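-- pv_equiv track=rewrite | github.com/duanetomlinson/linson_works | 2025-10-11_to_rpi2/working_archive/10-15-25/editor_base.py | extract_subpage_text
-- ===== SOURCE A (Python) =====
-- def extract_subpage_text(pages, subpage_index):
--     """
--     Extract the actual text from a specific subpage
--
--     Args:
--         pages: List of pages from get_screen_pages()
--         subpage_index: Which subpage to extract
--
--     Returns:
--         String of text from that subpage
--     """
--     if subpage_index >= len(pages):
--         return ""
--
--     text = []
--     page_chars = pages[subpage_index]
--
--     # Sort by y then x to maintain proper order
--     sorted_chars = sorted(page_chars, key=lambda item: (item[1], item[0]))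
--
--     for x, y, ch in sorted_chars:
--         text.append(ch)
--
--     return ''.join(text)
-- ===== SOURCE B (Python) =====
-- def extract_subpage_text(pages, subpage_index):
--     """Group the subpage's entries into rows keyed by y, then walk the rows in
--     sorted y order, each row sorted by x, collecting the characters."""
--     if subpage_index >= len(pages):
--         return ""
--
--     rows = {}
--     for item in pages[subpage_index]:
--         rows[item[1]] = rows.get(item[1], []) + [item]
--
--     out = []
--     for y in sorted(rows):
--         for item in sorted(rows[y], key=lambda it: it[0]):
--             out.append(item[2])
--
--     return ''.join(out)
-- ===== Notes on version B (the rewrite author's own statement) =====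
-- stated objective: alternative
-- what changed: Replaces the single global sort by the tuple key (y, x) with a one-pass dict grouping the entries by their y row, then walks the y keys in sorted order and sorts each row by x alone.
import Mathlib
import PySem

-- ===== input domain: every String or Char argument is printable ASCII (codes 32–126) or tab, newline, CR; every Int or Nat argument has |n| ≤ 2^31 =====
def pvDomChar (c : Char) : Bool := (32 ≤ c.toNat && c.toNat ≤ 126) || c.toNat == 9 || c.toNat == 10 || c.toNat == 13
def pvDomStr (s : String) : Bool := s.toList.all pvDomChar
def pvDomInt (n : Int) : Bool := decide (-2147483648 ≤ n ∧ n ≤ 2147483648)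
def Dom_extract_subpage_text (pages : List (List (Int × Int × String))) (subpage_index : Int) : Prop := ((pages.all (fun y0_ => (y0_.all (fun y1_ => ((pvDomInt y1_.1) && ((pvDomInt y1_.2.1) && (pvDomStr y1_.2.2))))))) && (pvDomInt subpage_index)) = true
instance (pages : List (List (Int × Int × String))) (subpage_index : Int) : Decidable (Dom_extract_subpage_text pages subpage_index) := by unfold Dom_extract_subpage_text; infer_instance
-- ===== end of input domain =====

-- B groups the subpage entries into y-rows with a dict, then walks the rows in sorted y
-- order sorting each row by x alone, instead of A's single global sort by the (y, x) key.


-- ===== PORT A =====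
def extract_subpage_text (pages : List (List (Int × Int × String))) (subpage_index : Int) : String :=
  if (pages.length : Int) ≤ subpage_index then ""
  else
    match PySem.List.pyGet? pages subpage_index with
    | none => ""  -- IndexError (subpage_index < -len(pages)); excluded by Pre_
    | some page_chars =>
      let sorted_chars := PySem.List.sorted2 page_chars (fun it => it.2.1) (fun it => it.1) false
      let text := sorted_chars.foldl (fun acc it => acc ++ [it.2.2]) ([] : List String)
      PySem.Str.join "" text

-- ===== PORT B =====
def extract_subpage_text_alt (pages : List (List (Int × Int × String))) (subpage_index : Int) : String :=
  if (pages.length : Int) ≤ subpage_index then ""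
  else
    match PySem.List.pyGet? pages subpage_index with
    | none => ""  -- IndexError (subpage_index < -len(pages)); excluded by Pre_
    | some page =>
      let rows := page.foldl
        (fun d it => d.modify it.2.1 [] (fun l => l ++ [it]))
        (PySem.Dict.empty : PySem.Dict Int (List (Int × Int × String)))
      let out := (PySem.List.sorted rows.keys (fun y => y) false).foldl
        (fun acc y =>
          (PySem.List.sorted (rows.getD y []) (fun it => it.1) false).foldl
            (fun acc2 it => acc2 ++ [it.2.2]) acc) ([] : List String)
      PySem.Str.join "" out

-- ===== PRECONDITION & SPEC =====
-- Pre_ excludes only subpage_index < -len(pages), where Python A (and Python B) raise IndexError.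
def Pre_extract_subpage_text (pages : List (List (Int × Int × String))) (subpage_index : Int) : Prop :=
  -(pages.length : Int) ≤ subpage_index
instance (pages : List (List (Int × Int × String))) (subpage_index : Int) : Decidable (Pre_extract_subpage_text pages subpage_index) := by unfold Pre_extract_subpage_text; infer_instance

def pvWitness_extract_subpage_text : (List (List (Int × Int × String))) × Int :=
  ([[(0, 1, "a"), (2, 0, "b"), (1, 0, "c")]], 0)

def Spec_extract_subpage_text (pages : List (List (Int × Int × String))) (subpage_index : Int) (out : String) : Prop := out = extract_subpage_text_alt pages subpage_index
instance (pages : List (List (Int × Int × String))) (subpage_index : Int) (out : String) : Decidable (Spec_extract_subpage_text pages subpage_index out) := by unfold Spec_extract_subpage_text; infer_instance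

-- ===== CLAIM (what is proved, stated in full; the proofs are below) =====
def Claim_equal_extract_subpage_text : Prop := ∀ (pages : List (List (Int × Int × String))) (subpage_index : Int), Dom_extract_subpage_text pages subpage_index → Pre_extract_subpage_text pages subpage_index → Spec_extract_subpage_text pages subpage_index (extract_subpage_text pages subpage_index)

-- ===== LEMMAS AND PROOFS =====

-- the lexicographic (y, x) "before" test used by A's sorted2
def pvBl (a b : Int × Int × String) : Bool :=
  decide (a.2.1 < b.2.1) || (!decide (b.2.1 < a.2.1) && decide (a.1 < b.1))

-- the x-only "before" test used by B's per-row sort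
def pvBx (a b : Int × Int × String) : Bool := decide (a.1 < b.1)

lemma sorted2_append_singleton (l : List (Int × Int × String)) (t : Int × Int × String) :
    PySem.List.sorted2 (l ++ [t]) (fun it => it.2.1) (fun it => it.1) false
      = PySem.List.insertBy pvBl t (PySem.List.sorted2 l (fun it => it.2.1) (fun it => it.1) false) := by
  simp only [PySem.List.sorted2, List.foldl_append]
  rfl

lemma sorted_x_append_singleton (l : List (Int × Int × String)) (t : Int × Int × String) :
    PySem.List.sorted (l ++ [t]) (fun it => it.1) false
      = PySem.List.insertBy pvBx t (PySem.List.sorted l (fun it => it.1) false) := by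
  simp only [PySem.List.sorted, List.foldl_append]
  rfl

lemma sorted_id_append_singleton (l : List Int) (v : Int) :
    PySem.List.sorted (l ++ [v]) (fun y => y) false
      = PySem.List.insertBy (fun a b => decide (a < b)) v (PySem.List.sorted l (fun y => y) false) := by
  simp only [PySem.List.sorted, List.foldl_append, if_neg (by decide : ¬ (false = true))]
  rfl

lemma insertBy_append_of_forall_false {α : Type} (before : α → α → Bool) (t : α)
    (bs rest : List α) (h : ∀ b ∈ bs, before t b = false) :
    PySem.List.insertBy before t (bs ++ rest) = bs ++ PySem.List.insertBy before t rest := by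
  induction bs with
  | nil => simp
  | cons b bs ih =>
    simp only [List.cons_append, PySem.List.insertBy, h b (by simp)]
    simp only [Bool.false_eq_true, if_false, List.cons.injEq, true_and]
    exact ih (fun x hx => h x (by simp [hx]))

lemma insertBy_append_block {α : Type} (before before2 : α → α → Bool) (t : α)
    (bs rest : List α) (hrest : ∀ r ∈ rest, before t r = true)
    (hbs : ∀ b ∈ bs, before t b = before2 t b) :
    PySem.List.insertBy before t (bs ++ rest) = PySem.List.insertBy before2 t bs ++ rest := by
  induction bs with
  | nil =>
    cases rest with
    | nil => simp [PySem.List.insertBy]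
    | cons r rs => simp [PySem.List.insertBy, hrest r (by simp)]
  | cons b bs ih =>
    have hb := hbs b (by simp)
    cases h2 : before2 t b with
    | true => simp [PySem.List.insertBy, hb, h2]
    | false =>
      simp only [List.cons_append, PySem.List.insertBy, hb, h2]
      simp only [Bool.false_eq_true, if_false]
      exact congrArg (b :: ·) (ih (fun x hx => hbs x (by simp [hx])))

lemma ins_flat_mem (ks : List Int) (S : Int → List (Int × Int × String)) (t : Int × Int × String)
    (hks : ks.Pairwise (· < ·))
    (hS : ∀ y ∈ ks, ∀ b ∈ S y, b.2.1 = y)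
    (hmem : t.2.1 ∈ ks) :
    PySem.List.insertBy pvBl t (ks.flatMap S)
      = ks.flatMap (fun y => if y = t.2.1 then PySem.List.insertBy pvBx t (S y) else S y) := by
  induction ks with
  | nil => simp at hmem
  | cons k ks ih =>
    have hlt : ∀ y ∈ ks, k < y := (List.pairwise_cons.mp hks).1
    have hks' := (List.pairwise_cons.mp hks).2
    simp only [List.flatMap_cons]
    by_cases hk : k = t.2.1
    · have hbs : ∀ b ∈ S k, pvBl t b = pvBx t b := by
        intro b hb
        have hb1 : b.2.1 = k := hS k (by simp) b hb
        simp [pvBl, pvBx, hb1, hk]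
      have hrest : ∀ r ∈ ks.flatMap S, pvBl t r = true := by
        intro r hr
        obtain ⟨y, hy, hry⟩ := List.mem_flatMap.mp hr
        have h1 : r.2.1 = y := hS y (by simp [hy]) r hry
        have h2 : t.2.1 < r.2.1 := by rw [h1, ← hk]; exact hlt y hy
        simp [pvBl, h2]
      rw [insertBy_append_block pvBl pvBx t _ _ hrest hbs, if_pos hk]
      congr 1
      refine (List.flatMap_congr ?_).symm
      intro y hy
      have : ¬ y = t.2.1 := by
        have := hlt y hy; omega
      simp [this]
    · have hmem' : t.2.1 ∈ ks := by
        rcases List.mem_cons.mp hmem with h | h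
        · exact absurd h.symm hk
        · exact h
      have hkt : k < t.2.1 := hlt _ hmem'
      have hfalse : ∀ b ∈ S k, pvBl t b = false := by
        intro b hb
        have hb1 : b.2.1 = k := hS k (by simp) b hb
        simp [pvBl, hb1]
        omega
      rw [insertBy_append_of_forall_false pvBl t _ _ hfalse,
        ih hks' (fun y hy => hS y (by simp [hy])) hmem', if_neg hk]

lemma ins_flat_new (ks : List Int) (S : Int → List (Int × Int × String)) (t : Int × Int × String)
    (hks : ks.Pairwise (· < ·))
    (hS : ∀ y ∈ ks, ∀ b ∈ S y, b.2.1 = y)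
    (hnew : t.2.1 ∉ ks)
    (hne : ∀ y ∈ ks, S y ≠ []) :
    PySem.List.insertBy pvBl t (ks.flatMap S)
      = (PySem.List.insertBy (fun a b => decide (a < b)) t.2.1 ks).flatMap
          (fun y => if y = t.2.1 then [t] else S y) := by
  induction ks with
  | nil => simp [PySem.List.insertBy]
  | cons k ks ih =>
    have hlt : ∀ y ∈ ks, k < y := (List.pairwise_cons.mp hks).1
    have hks' := (List.pairwise_cons.mp hks).2
    have hkne : ¬ k = t.2.1 := fun h => hnew (by simp [h.symm])
    by_cases hc : t.2.1 < k
    · -- t's row key precedes every existing key: t lands in front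
      obtain ⟨b, bs, hSk⟩ : ∃ b bs, S k = b :: bs := by
        cases h : S k with
        | nil => exact absurd h (hne k (by simp))
        | cons b bs => exact ⟨b, bs, rfl⟩
      have hb1 : b.2.1 = k := hS k (by simp) b (by simp [hSk])
      have hblt : pvBl t b = true := by simp [pvBl, hb1, hc]
      simp only [List.flatMap_cons, hSk, List.cons_append]
      rw [show PySem.List.insertBy pvBl t (b :: (bs ++ ks.flatMap S))
            = t :: b :: (bs ++ ks.flatMap S) by simp [PySem.List.insertBy, hblt]]
      rw [show PySem.List.insertBy (fun a b => decide (a < b)) t.2.1 (k :: ks)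
            = t.2.1 :: k :: ks by simp [PySem.List.insertBy, hc]]
      simp only [List.flatMap_cons, if_neg hkne]
      have htail : ks.flatMap (fun y => if y = t.2.1 then [t] else S y) = ks.flatMap S := by
        refine List.flatMap_congr ?_
        intro y hy
        have : ¬ y = t.2.1 := fun h => hnew (by simp [h ▸ hy])
        simp [this]
      rw [hSk, htail]
      simp
    · have hkt : k < t.2.1 := by
        rcases lt_trichotomy k t.2.1 with h | h | h
        · exact h
        · exact absurd h hkne
        · exact absurd h hc
      have hfalse : ∀ b ∈ S k, pvBl t b = false := by
        intro b hb
        have hb1 : b.2.1 = k := hS k (by simp) b hb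
        simp [pvBl, hb1]
        omega
      simp only [List.flatMap_cons]
      rw [insertBy_append_of_forall_false pvBl t _ _ hfalse,
        ih hks' (fun y hy => hS y (by simp [hy])) (fun h => hnew (by simp [h]))
          (fun y hy => hne y (by simp [hy])),
        show PySem.List.insertBy (fun a b => decide (a < b)) t.2.1 (k :: ks)
            = k :: PySem.List.insertBy (fun a b => decide (a < b)) t.2.1 ks by
          simp [PySem.List.insertBy, hc]]
      simp only [List.flatMap_cons, if_neg hkne]

-- A's global (y, x) sort decomposes into sorted distinct y keys with per-row x sorts
lemma sort_decomposition (page : List (Int × Int × String)) :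
    PySem.List.sorted2 page (fun it => it.2.1) (fun it => it.1) false
      = (PySem.List.sorted (PySem.Set.ofList (page.map (fun it => it.2.1))) (fun y => y) false).flatMap
          (fun y => PySem.List.sorted (page.filter (fun it => it.2.1 == y)) (fun it => it.1) false) := by
  induction page using List.reverseRecOn with
  | nil => rfl
  | append_singleton l t ih =>
    rw [sorted2_append_singleton, ih]
    have hpair : (PySem.List.sorted (PySem.Set.ofList (l.map (fun it => it.2.1))) (fun y => y) false).Pairwise (· < ·) :=
      PySem.List.sorted_ofList_pairwise_lt _
    have hS : ∀ y ∈ PySem.List.sorted (PySem.Set.ofList (l.map (fun it => it.2.1))) (fun y => y) false,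
        ∀ b ∈ PySem.List.sorted (l.filter (fun it => it.2.1 == y)) (fun it => it.1) false, b.2.1 = y := by
      intro y _ b hb
      have hbf : b ∈ l.filter (fun it => it.2.1 == y) := (PySem.List.mem_sorted _ _ _ _).mp hb
      have := (List.mem_filter.mp hbf).2
      simpa using this
    have hmemks : ∀ v : Int,
        (v ∈ PySem.List.sorted (PySem.Set.ofList (l.map (fun it => it.2.1))) (fun y => y) false)
          ↔ v ∈ l.map (fun it => it.2.1) := by
      intro v
      rw [PySem.List.mem_sorted, PySem.Set.mem_ofList]
    have hofl : PySem.Set.ofList ((l ++ [t]).map (fun it => it.2.1))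
        = PySem.Set.add (PySem.Set.ofList (l.map (fun it => it.2.1))) t.2.1 := by
      rw [List.map_append, PySem.Set.ofList_eq_foldl, List.foldl_append,
        ← PySem.Set.ofList_eq_foldl]
      rfl
    by_cases hm : t.2.1 ∈ l.map (fun it => it.2.1)
    · rw [ins_flat_mem _ _ t hpair hS ((hmemks _).mpr hm)]
      rw [hofl, PySem.Set.add_of_mem (by rw [PySem.Set.mem_ofList]; exact hm)]
      refine (List.flatMap_congr ?_).symm
      intro y hy
      rw [List.filter_append]
      by_cases hyt : y = t.2.1
      · have : ([t].filter (fun it => it.2.1 == y)) = [t] := by simp [hyt]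
        rw [this, if_pos hyt, sorted_x_append_singleton, hyt]
      · have : ([t].filter (fun it => it.2.1 == y)) = [] := by simp; omega
        rw [this, List.append_nil, if_neg hyt]
    · have hnotks : t.2.1 ∉ PySem.List.sorted (PySem.Set.ofList (l.map (fun it => it.2.1))) (fun y => y) false :=
        fun h => hm ((hmemks _).mp h)
      have hne : ∀ y ∈ PySem.List.sorted (PySem.Set.ofList (l.map (fun it => it.2.1))) (fun y => y) false,
          PySem.List.sorted (l.filter (fun it => it.2.1 == y)) (fun it => it.1) false ≠ [] := by
        intro y hy
        obtain ⟨it, hit, hity⟩ := List.mem_map.mp ((hmemks _).mp hy)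
        rw [Ne, PySem.List.sorted_eq_nil_iff]
        intro hnil
        have : it ∈ l.filter (fun it => it.2.1 == y) := List.mem_filter.mpr ⟨hit, by simp [hity]⟩
        rw [hnil] at this
        exact List.not_mem_nil this
      rw [ins_flat_new _ _ t hpair hS hnotks hne]
      rw [hofl, PySem.Set.add_of_not_mem (by rw [PySem.Set.mem_ofList]; exact hm),
        sorted_id_append_singleton]
      refine (List.flatMap_congr ?_).symm
      intro y hy
      rw [List.filter_append]
      by_cases hyt : y = t.2.1
      · have h1 : ([t].filter (fun it => it.2.1 == y)) = [t] := by simp [hyt]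
        have h0 : l.filter (fun it => it.2.1 == y) = [] := by
          rw [List.filter_eq_nil_iff]
          intro it hit
          simp only [beq_iff_eq]
          intro hcontra
          exact hm (List.mem_map.mpr ⟨it, hit, by rw [hcontra, hyt]⟩)
        rw [h1, h0, List.nil_append, if_pos hyt]
        rfl
      · have : ([t].filter (fun it => it.2.1 == y)) = [] := by simp; omega
        rw [this, List.append_nil, if_neg hyt]

theorem extract_subpage_text_spec : Claim_equal_extract_subpage_text := by
  intro pages idx hdom hpre
  unfold Spec_extract_subpage_text extract_subpage_text extract_subpage_text_alt
  by_cases hlen : (pages.length : Int) ≤ idx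
  · simp [hlen]
  · simp only [if_neg hlen]
    cases hp : PySem.List.pyGet? pages idx with
    | none =>
      exfalso
      rw [PySem.List.pyGet?_eq_none_iff] at hp
      unfold Pre_extract_subpage_text at hpre
      exact hp (by simp [PySem.Raise.InRange]; omega)
    | some page =>
      simp only
      -- B's dict fold as a fold over key-value pairs
      have hfold : page.foldl
            (fun d it => d.modify it.2.1 [] (fun l => l ++ [it]))
            (PySem.Dict.empty : PySem.Dict Int (List (Int × Int × String)))
          = (page.map (fun it => (it.2.1, it))).foldl
              (fun d p => d.modify p.1 [] (fun l => l ++ [p.2])) PySem.Dict.empty := by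
        rw [List.foldl_map]
      have hkeys : (page.foldl
            (fun d it => d.modify it.2.1 [] (fun l => l ++ [it]))
            (PySem.Dict.empty : PySem.Dict Int (List (Int × Int × String)))).keys
          = PySem.Set.ofList (page.map (fun it => it.2.1)) := by
        rw [PySem.Dict.keys_foldl_modify_key page (fun it => it.2.1) [] (fun _ it l => l ++ [it])]
        rw [PySem.Set.ofList_eq_foldl]
        rfl
      have hgetD : ∀ y : Int, (page.foldl
            (fun d it => d.modify it.2.1 [] (fun l => l ++ [it]))
            (PySem.Dict.empty : PySem.Dict Int (List (Int × Int × String)))).getD y []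
          = page.filter (fun it => it.2.1 == y) := by
        intro y
        rw [hfold, PySem.Dict.getD_foldl_modify_append]
        simp [List.filter_map, Function.comp_def]
      simp only [hkeys, hgetD]
      rw [sort_decomposition]
      simp only [PySem.List.foldl_append_singleton_eq_map, PySem.List.foldl_append_eq_flatMap,
        List.map_flatMap]
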